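-- pv_equiv track=rewrite | github.com/yamaguchigo1923/uruno_ocr_backend | test/di_llm/run_di_llm.py | pick_widest_table
-- ===== SOURCE A (Python) =====
-- from typing import Any, Dict, List, Tuple
--
-- def _count_nonempty_columns(table: List[List[str]]) -> int:
--     if not table:
--         return 0
--     max_cols = max((len(r) for r in table), default=0)
--     nonempty = 0
--     for c in range(max_cols):
--         has_val = False
--         for r in table:
--             if c < len(r) and str(r[c]).strip():
--                 has_val = True
--                 break
--         if has_val:
--             nonempty += 1
--     return nonempty
--
-- def pick_widest_table(tables: List[List[List[str]]]) -> Tuple[List[List[str]], Dict[str, int]]: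
--     """Pick the table with the most non-empty columns. Tie-break by raw cols, then rows."""
--     best_idx = -1
--     best_score = (-1, -1, -1)  # (nonempty_cols, raw_cols, rows)
--     for i, t in enumerate(tables):
--         rows = len(t)
--         raw_cols = max((len(r) for r in t), default=0)
--         nonempty_cols = _count_nonempty_columns(t)
--         score = (nonempty_cols, raw_cols, rows)
--         if score > best_score:
--             best_score = score
--             best_idx = i
--     if best_idx < 0:
--         return (tables[0] if tables else []), {"rows": 0, "raw_cols": 0, "nonempty_cols": 0, "index": 0}
--     chosen = tables[best_idx]
--     return chosen, {
--         "rows": len(chosen),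
--         "raw_cols": max((len(r) for r in chosen), default=0),
--         "nonempty_cols": _count_nonempty_columns(chosen),
--         "index": best_idx,
--     }
-- ===== SOURCE B (Python) =====
-- from typing import Dict, List, Tuple
--
-- def _count_nonempty_columns(table: List[List[str]]) -> int:
--     # single row-major pass: collect the indices of columns holding any non-blank cell
--     filled = set()
--     for row in table:
--         for c, cell in enumerate(row):
--             if str(cell).strip():
--                 filled.add(c)
--     return len(filled)
--
-- def pick_widest_table(tables: List[List[List[str]]]) -> Tuple[List[List[str]], Dict[str, int]]:
--     """Pick the table with the most non-empty columns. Tie-break by raw cols, then rows."""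
--     if not tables:
--         return [], {"rows": 0, "raw_cols": 0, "nonempty_cols": 0, "index": 0}
--     scores = [(_count_nonempty_columns(t), max((len(r) for r in t), default=0), len(t))
--               for t in tables]
--     best_idx, best = 0, scores[0]
--     for i, s in enumerate(scores[1:], 1):
--         if s > best:
--             best_idx, best = i, s
--     nonempty_cols, raw_cols, rows = best
--     return tables[best_idx], {
--         "rows": rows,
--         "raw_cols": raw_cols,
--         "nonempty_cols": nonempty_cols,
--         "index": best_idx,
--     }
-- ===== Notes on version B (the rewrite author's own statement) =====
-- stated objective: idiomatic
-- what changed: The column counter becomes a single row-major pass collecting filled column indices into a set (replacing the column-major nested scan with early break over range(max_cols)), and the picker precomputes all score triples once, scans them without the (-1,-1,-1) sentinel, and reuses the stored best score instead of recomputing rows/raw_cols/nonempty_cols for the chosen table.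
import Mathlib
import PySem

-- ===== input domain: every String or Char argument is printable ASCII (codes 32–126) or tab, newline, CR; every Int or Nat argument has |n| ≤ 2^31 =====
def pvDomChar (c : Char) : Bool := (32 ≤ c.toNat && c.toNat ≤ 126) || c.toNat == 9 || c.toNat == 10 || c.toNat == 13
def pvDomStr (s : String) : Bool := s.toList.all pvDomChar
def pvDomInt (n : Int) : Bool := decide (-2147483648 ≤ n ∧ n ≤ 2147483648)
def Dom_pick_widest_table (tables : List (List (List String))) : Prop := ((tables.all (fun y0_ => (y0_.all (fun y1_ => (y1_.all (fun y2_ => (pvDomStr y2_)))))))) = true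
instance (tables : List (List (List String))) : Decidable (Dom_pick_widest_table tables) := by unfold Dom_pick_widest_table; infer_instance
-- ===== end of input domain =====

-- B counts non-empty columns by one row-major pass over a set of filled column indices and
-- picks the best table from a precomputed score list without sentinel or recomputation;
-- same results, same cost (objective: idiomatic).


-- helpers shared by both ports (the identical Python subexpressions):
-- truthiness of str(cell).strip()
def pvFilled (s : String) : Bool := decide (PySem.Str.len (PySem.Str.strip s) ≠ 0)
-- max((len(r) for r in t), default=0)
def pvRawCols (t : List (List String)) : Int :=
  PySem.List.maxD (t.map fun r => (r.length : Int)) (fun x => x) 0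
-- Python's lexicographic '>' on an int triple
def pvLexGt (x y : Int × Int × Int) : Bool :=
  decide (x.1 > y.1) ||
    (decide (x.1 = y.1) &&
      (decide (x.2.1 > y.2.1) || (decide (x.2.1 = y.2.1) && decide (x.2.2 > y.2.2))))

-- ===== PORT A =====
-- _count_nonempty_columns: column-major loop over range(max_cols), inner search with break
def pvCountA (t : List (List String)) : Int :=
  if t.isEmpty then 0
  else
    (PySem.List.pyRange 0 (pvRawCols t) 1).foldl
      (fun n c =>
        if t.any (fun r => decide (c < (r.length : Int)) && pvFilled (PySem.List.pyGetD r c "")) then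
          n + 1
        else n)
      0

def pick_widest_table (tables : List (List (List String))) : List (List String) × (List (String × Int)) :=
  let st := (PySem.List.enumerate tables 0).foldl
    (fun (acc : Int × (Int × Int × Int)) p =>
      let rows : Int := p.2.length
      let raw_cols := pvRawCols p.2
      let nonempty_cols := pvCountA p.2
      let score := (nonempty_cols, raw_cols, rows)
      if pvLexGt score acc.2 then (p.1, score) else acc)
    (-1, (-1, -1, -1))
  if st.1 < 0 then
    (tables.headD [], [("rows", 0), ("raw_cols", 0), ("nonempty_cols", 0), ("index", 0)])
  else
    let chosen := PySem.List.pyGetD tables st.1 []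
    (chosen,
      [("rows", (chosen.length : Int)), ("raw_cols", pvRawCols chosen),
       ("nonempty_cols", pvCountA chosen), ("index", st.1)])

-- ===== PORT B =====
-- _count_nonempty_columns: one row-major pass collecting filled column indices into a set
def pvCountB (t : List (List String)) : Int :=
  ((t.foldl
      (fun s row =>
        (PySem.List.enumerate row 0).foldl
          (fun s2 p => if pvFilled p.2 then PySem.Set.add s2 p.1 else s2) s)
      (PySem.Set.ofList ([] : List Int))).length : Int)

def pvScoreB (t : List (List String)) : Int × Int × Int :=
  (pvCountB t, pvRawCols t, (t.length : Int))

def pick_widest_table_alt (tables : List (List (List String))) : List (List String) × (List (String × Int)) :=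
  if tables.isEmpty then
    ([], [("rows", 0), ("raw_cols", 0), ("nonempty_cols", 0), ("index", 0)])
  else
    let scores := tables.map pvScoreB
    let st := (PySem.List.enumerate (PySem.List.slice scores (some 1) none) 1).foldl
      (fun (acc : Int × (Int × Int × Int)) p => if pvLexGt p.2 acc.2 then p else acc)
      (0, PySem.List.pyGetD scores 0 (0, 0, 0))
    (PySem.List.pyGetD tables st.1 [],
      [("rows", st.2.2.2), ("raw_cols", st.2.2.1), ("nonempty_cols", st.2.1), ("index", st.1)])

-- ===== PRECONDITION & SPEC =====
def Spec_pick_widest_table (tables : List (List (List String))) (out : List (List String) × (List (String × Int))) : Prop := out = pick_widest_table_alt tables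
instance (tables : List (List (List String))) (out : List (List String) × (List (String × Int))) : Decidable (Spec_pick_widest_table tables out) := by unfold Spec_pick_widest_table; infer_instance

-- ===== CLAIM (what is proved, stated in full; the proofs are below) =====
def Claim_equal_pick_widest_table : Prop := ∀ (tables : List (List (List String))), Dom_pick_widest_table tables → Spec_pick_widest_table tables (pick_widest_table tables)

-- ===== LEMMAS AND PROOFS =====

-- membership in a fold that conditionally adds g p
theorem pv_mem_fold_add {α β : Type} [BEq α] [LawfulBEq α] (l : List β) (q : β → Bool)
    (g : β → α) (s : PySem.Set α) (c : α) :
    (c ∈ l.foldl (fun s2 p => if q p then PySem.Set.add s2 (g p) else s2) s) ↔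
      c ∈ s ∨ ∃ p ∈ l, q p ∧ c = g p := by
  induction l generalizing s with
  | nil => simp
  | cons x xs ih =>
    simp only [List.foldl_cons, ih]
    by_cases hq : q x
    · simp only [hq, if_true, PySem.Set.mem_add, List.mem_cons]
      constructor
      · rintro ((h | h) | ⟨p, hp, h1, h2⟩)
        · exact Or.inl h
        · exact Or.inr ⟨x, Or.inl rfl, hq, h⟩
        · exact Or.inr ⟨p, Or.inr hp, h1, h2⟩
      · rintro (h | ⟨p, (rfl | hp), h1, h2⟩)
        · exact Or.inl (Or.inl h)
        · exact Or.inl (Or.inr h2)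
        · exact Or.inr ⟨p, hp, h1, h2⟩
    · simp only [hq, if_false, List.mem_cons, Bool.false_eq_true]
      constructor
      · rintro (h | ⟨p, hp, h1, h2⟩)
        · exact Or.inl h
        · exact Or.inr ⟨p, Or.inr hp, h1, h2⟩
      · rintro (h | ⟨p, (rfl | hp), h1, h2⟩)
        · exact Or.inl h
        · exact absurd h1 hq
        · exact Or.inr ⟨p, hp, h1, h2⟩

theorem pv_nodup_fold_add {α β : Type} [BEq α] [LawfulBEq α] (l : List β) (q : β → Bool)
    (g : β → α) (s : PySem.Set α) (hs : s.Nodup) :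
    (l.foldl (fun s2 p => if q p then PySem.Set.add s2 (g p) else s2) s).Nodup := by
  induction l generalizing s with
  | nil => exact hs
  | cons x xs ih =>
    simp only [List.foldl_cons]
    by_cases hq : q x
    · simpa [hq] using ih _ (PySem.Set.nodup_add _ _ hs)
    · simpa [hq] using ih _ hs



-- nodup of the whole row-major set
theorem pv_nodup_S (t : List (List String)) :
    (t.foldl
      (fun s row =>
        (PySem.List.enumerate row 0).foldl
          (fun s2 p => if pvFilled p.2 then PySem.Set.add s2 p.1 else s2) s)
      (PySem.Set.ofList ([] : List Int))).Nodup := by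
  have H : ∀ (l : List (List String)) (s : PySem.Set Int), s.Nodup →
      (l.foldl
        (fun s row =>
          (PySem.List.enumerate row 0).foldl
            (fun s2 p => if pvFilled p.2 then PySem.Set.add s2 p.1 else s2) s) s).Nodup := by
    intro l
    induction l with
    | nil => intro s hs; exact hs
    | cons r rs ih =>
      intro s hs
      simpa using ih _ (pv_nodup_fold_add (PySem.List.enumerate r 0) (fun p => pvFilled p.2) Prod.fst s hs)
  exact H t _ (PySem.Set.nodup_ofList _)

-- membership in the row-major set
theorem pv_mem_S (t : List (List String)) (c : Int) :
    (c ∈ t.foldl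
      (fun s row =>
        (PySem.List.enumerate row 0).foldl
          (fun s2 p => if pvFilled p.2 then PySem.Set.add s2 p.1 else s2) s)
      (PySem.Set.ofList ([] : List Int))) ↔
    ∃ row ∈ t, ∃ k : Nat, ∃ _ : k < row.length, pvFilled row[k] ∧ c = (k : Int) := by
  have H : ∀ (l : List (List String)) (s : PySem.Set Int),
      (c ∈ l.foldl
        (fun s row =>
          (PySem.List.enumerate row 0).foldl
            (fun s2 p => if pvFilled p.2 then PySem.Set.add s2 p.1 else s2) s) s) ↔
      c ∈ s ∨ ∃ row ∈ l, ∃ p ∈ PySem.List.enumerate row 0, pvFilled p.2 ∧ c = p.1 := by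
    intro l
    induction l with
    | nil => intro s; simp
    | cons r rs ih =>
      intro s
      simp only [List.foldl_cons, ih,
        pv_mem_fold_add (PySem.List.enumerate r 0) (fun p => pvFilled p.2) Prod.fst s c,
        List.mem_cons]
      constructor
      · rintro ((h | ⟨p, hp, h1, h2⟩) | ⟨row, hrow, p, hp, h1, h2⟩)
        · exact Or.inl h
        · exact Or.inr ⟨r, Or.inl rfl, p, hp, h1, h2⟩
        · exact Or.inr ⟨row, Or.inr hrow, p, hp, h1, h2⟩
      · rintro (h | ⟨row, (rfl | hrow), p, hp, h1, h2⟩)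
        · exact Or.inl (Or.inl h)
        · exact Or.inl (Or.inr ⟨p, hp, h1, h2⟩)
        · exact Or.inr ⟨row, hrow, p, hp, h1, h2⟩
  rw [H]
  constructor
  · rintro (h | ⟨row, hrow, p, hp, h1, h2⟩)
    · simp at h
    · obtain ⟨k, hk, rfl⟩ := (PySem.List.mem_enumerate_iff row 0 p).mp hp
      exact ⟨row, hrow, k, hk, by simpa using h1, by simpa using h2⟩
  · rintro ⟨row, hrow, k, hk, h1, rfl⟩
    refine Or.inr ⟨row, hrow, ((k : Int), row[k]), ?_, h1, rfl⟩
    exact (PySem.List.mem_enumerate_iff row 0 _).mpr ⟨k, hk, by simp⟩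

-- every row length is bounded by the raw column count
theorem pv_len_le_raw (t : List (List String)) (row : List String) (h : row ∈ t) :
    (row.length : Int) ≤ pvRawCols t := by
  unfold pvRawCols PySem.List.maxD
  cases hm : PySem.List.max? (t.map fun r => (r.length : Int)) (fun x => x) with
  | none =>
    rw [PySem.List.max?_eq_none_iff] at hm
    simp at hm
    subst hm; simp at h
  | some m =>
    simpa using PySem.List.max?_isMax hm ((row.length : Int)) (List.mem_map_of_mem h)

-- the column-major test of A, characterised
theorem pv_pred_iff (t : List (List String)) (c : Int) (hc : 0 ≤ c) :
    (t.any fun r => decide (c < (r.length : Int)) && pvFilled (PySem.List.pyGetD r c "")) = true ↔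
    ∃ row ∈ t, ∃ k : Nat, ∃ _ : k < row.length, pvFilled row[k] ∧ c = (k : Int) := by
  obtain ⟨n, rfl⟩ := Int.eq_ofNat_of_zero_le hc
  simp only [List.any_eq_true, Bool.and_eq_true, decide_eq_true_eq]
  constructor
  · rintro ⟨r, hr, hlt, hf⟩
    have hn : n < r.length := by exact_mod_cast hlt
    refine ⟨r, hr, n, hn, ?_, rfl⟩
    rw [PySem.List.pyGetD_natCast, List.getD_eq_getElem r "" hn] at hf
    exact hf
  · rintro ⟨row, hrow, k, hk, hf, hck⟩
    have hnk : n = k := by exact_mod_cast hck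
    subst hnk
    refine ⟨row, hrow, by exact_mod_cast hk, ?_⟩
    rw [PySem.List.pyGetD_natCast, List.getD_eq_getElem row "" hk]
    exact hf

-- the two column counters agree
theorem pv_countAB (t : List (List String)) : pvCountA t = pvCountB t := by
  by_cases ht : t = []
  · subst ht; rfl
  · have hne : t.isEmpty = false := by simpa using ht
    unfold pvCountA pvCountB
    rw [hne]
    simp only [Bool.false_eq_true, if_false]
    rw [PySem.List.foldl_count_if
      (fun c => t.any fun r => decide (c < (r.length : Int)) && pvFilled (PySem.List.pyGetD r c ""))
      (PySem.List.pyRange 0 (pvRawCols t)) 0]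
    rw [List.countP_eq_length_filter]
    have hperm : ((PySem.List.pyRange 0 (pvRawCols t)).filter
        (fun c => t.any fun r => decide (c < (r.length : Int)) && pvFilled (PySem.List.pyGetD r c ""))).Perm
        (t.foldl
          (fun s row =>
            (PySem.List.enumerate row 0).foldl
              (fun s2 p => if pvFilled p.2 then PySem.Set.add s2 p.1 else s2) s)
          (PySem.Set.ofList ([] : List Int))) := by
      rw [List.perm_ext_iff_of_nodup (List.Nodup.filter _ (PySem.List.nodup_pyRange_one 0 (pvRawCols t))) (pv_nodup_S t)]
      intro a
      rw [List.mem_filter, pv_mem_S, PySem.List.mem_pyRange_one]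
      constructor
      · rintro ⟨⟨h0, _⟩, hp⟩
        exact (pv_pred_iff t a h0).mp hp
      · rintro ⟨row, hrow, k, hk, h1, rfl⟩
        have hb : ((k : Int)) < pvRawCols t :=
          lt_of_lt_of_le (by exact_mod_cast hk) (pv_len_le_raw t row hrow)
        exact ⟨⟨by positivity, hb⟩, (pv_pred_iff t _ (by positivity)).mpr ⟨row, hrow, k, hk, h1, rfl⟩⟩
    rw [hperm.length_eq]
    simp

-- (pvCountB t, pvRawCols t, len t) is pvScoreB t
theorem pv_scoreB_def (t : List (List String)) :
    ((pvCountB t, pvRawCols t, (t.length : Int)) : Int × Int × Int) = pvScoreB t := rfl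

theorem pv_countB_nonneg (t : List (List String)) : 0 ≤ pvCountB t := by
  unfold pvCountB; positivity

-- the first score always beats the sentinel
theorem pv_sentinel (t : List (List String)) : pvLexGt (pvScoreB t) (-1, -1, -1) = true := by
  have h := pv_countB_nonneg t
  simp only [pvLexGt, pvScoreB, Bool.or_eq_true, decide_eq_true_eq]
  left; omega

theorem pv_enumerate_map {A B : Type} (g : A → B) (xs : List A) (k : Int) :
    PySem.List.enumerate (xs.map g) k = (PySem.List.enumerate xs k).map (fun p => (p.1, g p.2)) := by
  induction xs generalizing k with
  | nil => simp [PySem.List.enumerate_nil]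
  | cons x xs ih => simp [PySem.List.enumerate_cons, ih]

-- the selection fold keeps an index whose stored score is the score of the indexed table
theorem pv_fold_inv (tables : List (List (List String))) (rest : List (List (List String))) :
    ∀ (k m : Nat), tables.drop k = rest → m < tables.length →
    ∃ m' : Nat, m' < tables.length ∧
      (PySem.List.enumerate rest (k : Int)).foldl
        (fun (acc : Int × (Int × Int × Int)) p =>
          if pvLexGt (pvScoreB p.2) acc.2 then (p.1, pvScoreB p.2) else acc)
        ((m : Int), pvScoreB (PySem.List.pyGetD tables (m : Int) []))
      = ((m' : Int), pvScoreB (PySem.List.pyGetD tables (m' : Int) [])) := by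
  induction rest with
  | nil =>
    intro k m _ hm
    exact ⟨m, hm, by simp [PySem.List.enumerate_nil]⟩
  | cons r rs ih =>
    intro k m hr hm
    have h0 : tables[k]? = some r := by
      have h := @List.getElem?_drop _ tables k 0
      rw [hr] at h
      simpa using h.symm
    obtain ⟨hk, hgetk⟩ := List.getElem?_eq_some_iff.mp h0
    have hget : PySem.List.pyGetD tables (k : Int) [] = r := by
      rw [PySem.List.pyGetD_natCast, List.getD_eq_getElem tables [] hk]
      exact hgetk
    have hdrop : tables.drop (k + 1) = rs := by
      have h := @List.drop_drop _ 1 k tables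
      rw [hr] at h
      simpa using h.symm
    rw [PySem.List.enumerate_cons]
    simp only [List.foldl_cons]
    by_cases hgt : pvLexGt (pvScoreB r) (pvScoreB (PySem.List.pyGetD tables (m : Int) [])) = true
    · rw [if_pos hgt]
      have hgoal := ih (k + 1) k hdrop hk
      rw [hget] at hgoal
      push_cast at hgoal ⊢
      exact hgoal
    · rw [if_neg hgt]
      have hgoal := ih (k + 1) m hdrop hm
      push_cast at hgoal ⊢
      exact hgoal

theorem pv_main (tables : List (List (List String))) :
    pick_widest_table tables = pick_widest_table_alt tables := by
  cases tables with
  | nil => rfl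
  | cons t rest =>
    have hinit : PySem.List.pyGetD (t :: rest) (((0 : Nat)) : Int) [] = t := by
      rw [PySem.List.pyGetD_natCast]; rfl
    obtain ⟨m', hm', hfold⟩ := pv_fold_inv (t :: rest) rest 1 0 rfl (by simp)
    rw [hinit] at hfold
    push_cast at hfold
    unfold pick_widest_table pick_widest_table_alt
    simp only [List.isEmpty_cons, Bool.false_eq_true, if_false, pv_countAB, pv_scoreB_def,
      PySem.List.enumerate_cons, List.foldl_cons, pv_sentinel, if_true,
      PySem.List.slice_from _ (by norm_num : (0:Int) ≤ 1), List.map_cons, zero_add]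
    rw [show ((1:Int).toNat) = 1 from rfl]
    simp only [List.drop_succ_cons, List.drop_zero, pv_enumerate_map, List.foldl_map]
    have hsc0 : PySem.List.pyGetD (pvScoreB t :: rest.map pvScoreB) (0 : Int) (0, 0, 0) = pvScoreB t := by
      rw [PySem.List.pyGetD_of_nonneg _ _ le_rfl]; rfl
    rw [hsc0]
    rw [hfold]
    have hnn : ¬ ((m' : Int) < 0) := by omega
    rw [if_neg hnn]
    simp [pvScoreB]

-- ===== VERDICT (by name: the statement is the Claim_ definition above) =====
theorem pick_widest_table_spec : Claim_equal_pick_widest_table := by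
  intro tables _
  unfold Spec_pick_widest_table
  exact pv_main tables
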